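-- pv_equiv track=rewrite | github.com/wanghaizhou/AdventOfCode | adventofcode/2023/day11/day11_part2.py | calculateWithMultiple
-- ===== SOURCE A (Python) =====
-- multiple = 1000000
--
-- def calculateWithMultiple(x1, x2, lineToExpand):
--     min_v = min([x1, x2])
--     max_v = max([x1, x2])
--     length = 0
--     for i in range(min_v, max_v):
--         if i in lineToExpand:
--             length += multiple
--         else:
--             length += 1
--     return length
--     pass
-- ===== SOURCE B (Python) =====
-- multiple = 1000000
--
-- def calculateWithMultiple(x1, x2, lineToExpand):
--     lo, hi = (x1, x2) if x1 <= x2 else (x2, x1)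
--     count = len({v for v in lineToExpand if lo <= v < hi})
--     return (hi - lo) + count * (multiple - 1)
-- ===== Notes on version B (the rewrite author's own statement) =====
-- stated objective: faster
-- what changed: Replaces the per-cell loop over range(min,max) with a closed form: (max-min) plus (number of distinct expanded lines inside the interval) * (multiple-1), computed by one filter over lineToExpand.
import Mathlib
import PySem

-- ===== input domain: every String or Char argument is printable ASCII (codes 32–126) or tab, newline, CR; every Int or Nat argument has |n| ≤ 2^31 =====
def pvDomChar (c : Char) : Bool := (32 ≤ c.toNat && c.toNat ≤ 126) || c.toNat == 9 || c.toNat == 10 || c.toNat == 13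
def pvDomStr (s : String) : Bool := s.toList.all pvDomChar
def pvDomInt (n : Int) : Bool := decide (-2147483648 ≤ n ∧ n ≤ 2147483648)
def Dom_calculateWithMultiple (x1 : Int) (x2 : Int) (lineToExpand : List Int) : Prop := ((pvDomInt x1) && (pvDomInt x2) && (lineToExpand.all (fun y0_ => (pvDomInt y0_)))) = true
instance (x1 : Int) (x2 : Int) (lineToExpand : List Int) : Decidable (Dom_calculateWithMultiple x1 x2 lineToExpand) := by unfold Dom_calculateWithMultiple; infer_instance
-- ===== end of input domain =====

-- ===== PORT A =====
-- one honest line: B replaces A's per-cell loop over the interval by a closed form counting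
-- the distinct expanded lines inside the interval (faster: O(|lineToExpand|) vs O(max-min)).
def calculateWithMultiple (x1 : Int) (x2 : Int) (lineToExpand : List Int) : Int :=
  let min_v := (PySem.List.min? [x1, x2] (fun y => y)).getD 0
  let max_v := (PySem.List.max? [x1, x2] (fun y => y)).getD 0
  (PySem.List.pyRange min_v max_v 1).foldl
    (fun length i => if i ∈ lineToExpand then length + 1000000 else length + 1) 0

-- ===== PORT B =====
def calculateWithMultiple_alt (x1 : Int) (x2 : Int) (lineToExpand : List Int) : Int :=
  let lo := if x1 ≤ x2 then x1 else x2
  let hi := if x1 ≤ x2 then x2 else x1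
  let count := PySem.Set.len (PySem.Set.ofList
    (lineToExpand.filter (fun v => decide (lo ≤ v ∧ v < hi))))
  (hi - lo) + count * (1000000 - 1)

-- ===== PRECONDITION & SPEC =====
def Spec_calculateWithMultiple (x1 : Int) (x2 : Int) (lineToExpand : List Int) (out : Int) : Prop := out = calculateWithMultiple_alt x1 x2 lineToExpand
instance (x1 : Int) (x2 : Int) (lineToExpand : List Int) (out : Int) : Decidable (Spec_calculateWithMultiple x1 x2 lineToExpand out) := by unfold Spec_calculateWithMultiple; infer_instance

-- ===== CLAIM (what is proved, stated in full; the proofs are below) =====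
def Claim_equal_calculateWithMultiple : Prop := ∀ (x1 : Int) (x2 : Int) (lineToExpand : List Int), Dom_calculateWithMultiple x1 x2 lineToExpand → Spec_calculateWithMultiple x1 x2 lineToExpand (calculateWithMultiple x1 x2 lineToExpand)

-- ===== LEMMAS AND PROOFS =====

-- A's loop body, folded over any list, adds 1 per element plus 999999 per element in L.
theorem fold_count (L : List Int) (l : List Int) (a : Int) :
    l.foldl (fun acc i => if i ∈ L then acc + 1000000 else acc + 1) a
      = a + l.length + ((l.countP (fun i => decide (i ∈ L))) : Int) * 999999 := by
  induction l generalizing a with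
  | nil => simp
  | cons x t ih =>
    by_cases h : x ∈ L <;> simp [h, ih] <;> ring

-- The interval cells lying in L and the distinct L-values lying in the interval
-- are the same finite set, hence equinumerous.
theorem count_range_eq (lo hi : Int) (L : List Int) :
    (PySem.List.pyRange lo hi 1).countP (fun i => decide (i ∈ L))
      = (PySem.Set.ofList (L.filter (fun v => decide (lo ≤ v ∧ v < hi)))).length := by
  rw [List.countP_eq_length_filter]
  apply List.Perm.length_eq
  rw [List.perm_ext_iff_of_nodup
    ((PySem.List.nodup_pyRange_one lo hi).filter _)
    (PySem.Set.nodup_ofList _)]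
  intro x
  simp [PySem.List.mem_pyRange_one, PySem.Set.mem_ofList]
  tauto

theorem calc_eq (x1 x2 : Int) (L : List Int) :
    calculateWithMultiple x1 x2 L = calculateWithMultiple_alt x1 x2 L := by
  unfold calculateWithMultiple calculateWithMultiple_alt
  rw [PySem.List.min?_id_cons, PySem.List.max?_id_cons]
  simp only [List.foldl, Option.getD_some, min_def, max_def]
  rw [fold_count, count_range_eq]
  have hle : (if x1 ≤ x2 then x1 else x2) ≤ (if x1 ≤ x2 then x2 else x1) := by
    split_ifs with h <;> omega
  rw [PySem.List.length_pyRange_one]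
  simp [PySem.Set.len]
  omega

-- ===== VERDICT (by name: the statement is the Claim_ definition above) =====
theorem calculateWithMultiple_spec : Claim_equal_calculateWithMultiple := by
  intro x1 x2 L _
  exact calc_eq x1 x2 L
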